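-- pv_equiv track=rewrite | github.com/ray-project/ray | .venv/lib/python3.6/site-packages/_pytest/assertion/util.py | _split_explanation
-- ===== SOURCE A (Python) =====
-- def _split_explanation(explanation):
--     """Return a list of individual lines in the explanation
--
--     This will return a list of lines split on '\n{', '\n}' and '\n~'.
--     Any other newlines will be escaped and appear in the line as the
--     literal '\n' characters.
--     """
--     raw_lines = (explanation or u"").split("\n")
--     lines = [raw_lines[0]]
--     for values in raw_lines[1:]:
--         if values and values[0] in ["{", "}", "~", ">"]:
--             lines.append(values)
--         else:
--             lines[-1] += "\\n" + values
--     return lines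
-- ===== SOURCE B (Python) =====
-- def _split_explanation(explanation):
--     s = explanation or u""
--     esc = [u"\\n" if c == u"\n" and nxt not in u"{}~>" else c
--            for c, nxt in zip(s, s[1:] + u"\n")]
--     return u"".join(esc).split(u"\n")
-- ===== Notes on version B (the rewrite author's own statement) =====
-- stated objective: idiomatic
-- what changed: A's stateful merge loop (append each fragment or mutate lines[-1]) is replaced by a single character-level transform that escapes every newline whose successor is not one of the four special prefix characters (computed by zipping the string with its shift), followed by one plain split on newline; no per-fragment accumulator state is kept.
import Mathlib
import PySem

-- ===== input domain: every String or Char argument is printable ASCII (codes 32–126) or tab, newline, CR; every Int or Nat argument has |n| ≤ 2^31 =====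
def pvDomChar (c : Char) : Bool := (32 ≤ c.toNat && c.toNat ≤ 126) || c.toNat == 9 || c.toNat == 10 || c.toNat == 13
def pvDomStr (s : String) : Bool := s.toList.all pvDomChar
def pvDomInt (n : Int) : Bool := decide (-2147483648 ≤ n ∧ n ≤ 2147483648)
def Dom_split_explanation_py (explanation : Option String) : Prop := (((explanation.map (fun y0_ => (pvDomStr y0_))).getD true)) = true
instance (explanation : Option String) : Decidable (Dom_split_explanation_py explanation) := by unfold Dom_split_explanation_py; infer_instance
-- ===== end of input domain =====

-- B replaces A's stateful merge loop by a one-shot transform (escape every newline whose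
-- successor is not one of '{','}','~','>') followed by a plain split — objective: idiomatic.

-- ===== PORT A =====
-- 'values and values[0] in ["{", "}", "~", ">"]'
def pvAOK (v : List Char) : Bool :=
  match v with
  | [] => false
  | c :: _ => decide (c ∈ ['{', '}', '~', '>'])

-- the loop body: 'lines.append(values)' / 'lines[-1] += "\\n" + values'
-- (lines is never empty — it starts as [raw_lines[0]] — so getLastD/dropLast are exact)
def pvStep (lines : List (List Char)) (values : List Char) : List (List Char) :=
  if pvAOK values then lines ++ [values]
  else lines.dropLast ++ [lines.getLastD [] ++ ('\\' :: 'n' :: values)]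

def split_explanation_py (explanation : Option String) : List String :=
  -- raw_lines = (explanation or u"").split("\n")   (strings handled as char lists throughout)
  let raw_lines := PySem.Chars.splitOn (explanation.getD "").toList ['\n']
  -- lines = [raw_lines[0]]  (split always returns ≥ 1 piece, so headD is exact);
  -- raw_lines[1:] is .drop 1
  let lines := (raw_lines.drop 1).foldl pvStep [raw_lines.headD []]
  lines.map String.ofList

-- ===== PORT B =====
-- the comprehension's body: '"\\n" if c == "\n" and nxt not in "{}~>" else c'
def pvF (p : Char × Char) : List Char :=
  if p.1 = '\n' ∧ p.2 ∉ ['{', '}', '~', '>'] then ['\\', 'n'] else [p.1]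

def split_explanation_py_alt (explanation : Option String) : List String :=
  let cs := (explanation.getD "").toList
  -- esc = [... for c, nxt in zip(s, s[1:] + '\n')]
  let esc := (cs.zip (cs.drop 1 ++ ['\n'])).map pvF
  -- ''.join(esc).split('\n')
  (PySem.Chars.splitOn (PySem.Chars.join [] esc) ['\n']).map String.ofList

-- ===== PRECONDITION & SPEC =====
def Spec_split_explanation_py (explanation : Option String) (out : List String) : Prop := out = split_explanation_py_alt explanation
instance (explanation : Option String) (out : List String) : Decidable (Spec_split_explanation_py explanation out) := by unfold Spec_split_explanation_py; infer_instance

-- ===== CLAIM (what is proved, stated in full; the proofs are below) =====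
def Claim_equal_split_explanation_py : Prop := ∀ (explanation : Option String), Dom_split_explanation_py explanation → Spec_split_explanation_py explanation (split_explanation_py explanation)

-- ===== LEMMAS AND PROOFS =====

-- structural version of split-on-'\n'
def pvMySplit : List Char → List (List Char)
  | [] => [[]]
  | c :: r =>
      if c = '\n' then [] :: pvMySplit r
      else
        match pvMySplit r with
        | [] => [[c]]
        | h :: t => (c :: h) :: t

-- prepend a to the head piece
def pvPH (a : List Char) : List (List Char) → List (List Char)
  | [] => [a]
  | h :: t => (a ++ h) :: t

lemma pvMySplit_ne_nil (cs : List Char) : pvMySplit cs ≠ [] := by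
  cases cs with
  | nil => simp [pvMySplit]
  | cons c r =>
    simp only [pvMySplit]
    split
    · simp
    · split <;> simp

lemma pvMySplit_nl (x : List Char) : pvMySplit ('\n' :: x) = [] :: pvMySplit x := by
  simp [pvMySplit]

lemma pvMySplit_cons_ne (c : Char) (h : c ≠ '\n') (x : List Char) :
    pvMySplit (c :: x) = pvPH [c] (pvMySplit x) := by
  simp only [pvMySplit, if_neg h]
  cases hx : pvMySplit x <;> simp [pvPH]

lemma pvPH_pvPH (a b : List Char) (l : List (List Char)) :
    pvPH a (pvPH b l) = pvPH (a ++ b) l := by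
  cases l <;> simp [pvPH]

lemma pvGo_eq (fuel : Nat) : ∀ (l cur acc : _),
    l.length ≤ fuel →
    PySem.Chars.splitOn.go ['\n'] fuel l cur acc =
      acc.reverse ++ pvPH cur.reverse (pvMySplit l) := by
  induction fuel with
  | zero =>
    intro l cur acc h
    have hl : l = [] := by cases l <;> simp_all
    subst hl
    simp [PySem.Chars.splitOn.go, pvMySplit, pvPH]
  | succ f ih =>
    intro l cur acc h
    cases l with
    | nil => simp [PySem.Chars.splitOn.go, pvMySplit, pvPH]
    | cons c rest =>
      rw [PySem.Chars.splitOn.go]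
      by_cases hc : c = '\n'
      · subst hc
        have hpre : List.isPrefixOf ['\n'] ('\n' :: rest) = true := by simp [List.isPrefixOf]
        rw [if_pos hpre]
        rw [ih _ _ _ (by simpa using Nat.le_of_succ_le_succ h)]
        rw [pvMySplit_nl]
        cases hr : pvMySplit rest with
        | nil => exact absurd hr (pvMySplit_ne_nil rest)
        | cons a t => simp [pvPH, hr]
      · have hpre : List.isPrefixOf ['\n'] (c :: rest) = false := by
          simp only [List.isPrefixOf, Bool.and_true]
          exact decide_eq_false (fun h => hc h.symm)
        rw [if_neg (by simp [hpre])]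
        rw [ih _ _ _ (by simpa using Nat.le_of_succ_le_succ h)]
        rw [pvMySplit_cons_ne c hc]
        cases hr : pvMySplit rest with
        | nil => exact absurd hr (pvMySplit_ne_nil rest)
        | cons a t => simp [pvPH]

lemma pvSplitOn_nl (cs : List Char) :
    PySem.Chars.splitOn cs ['\n'] = pvMySplit cs := by
  unfold PySem.Chars.splitOn
  rw [pvGo_eq _ _ _ _ (by omega)]
  cases h : pvMySplit cs with
  | nil => exact absurd h (pvMySplit_ne_nil cs)
  | cons a t => simp [pvPH]

lemma pvJoin_nil_flatten : ∀ l : List (List Char), PySem.Chars.join [] l = l.flatten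
  | [] => by simp [PySem.Chars.join, List.intercalate]
  | [a] => by simp [PySem.Chars.join, List.intercalate]
  | a :: b :: t => by
      rw [PySem.Chars.join_cons_cons, pvJoin_nil_flatten (b :: t)]
      simp

-- the char-level spec both sides reduce to
def pvSpec : List Char → List (List Char)
  | [] => [[]]
  | c :: r =>
      if c = '\n' then
        if r.headD '\n' ∈ ['{', '}', '~', '>'] then [] :: pvSpec r
        else pvPH ['\\', 'n'] (pvSpec r)
      else pvPH [c] (pvSpec r)

-- B's transform, as a function of the char list
def pvTF (cs : List Char) : List Char :=
  ((cs.zip (cs.drop 1 ++ ['\n'])).map pvF).flatten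

lemma pvTF_cons (c : Char) (r : List Char) :
    pvTF (c :: r) = pvF (c, r.headD '\n') ++ pvTF r := by
  cases r <;> simp [pvTF]

lemma pvX (cs : List Char) : pvMySplit (pvTF cs) = pvSpec cs := by
  induction cs with
  | nil => rfl
  | cons c r ih =>
    rw [pvTF_cons]
    by_cases hc : c = '\n'
    · subst hc
      by_cases hm : r.headD '\n' ∈ ['{', '}', '~', '>']
      · have hf : pvF ('\n', r.headD '\n') = ['\n'] := by
          unfold pvF; exact if_neg (fun h => h.2 hm)
        rw [hf]
        show pvMySplit ('\n' :: pvTF r) = _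
        rw [pvMySplit_nl, ih]
        simp only [pvSpec]
        rw [if_pos trivial, if_pos hm]
      · have hf : pvF ('\n', r.headD '\n') = ['\\', 'n'] := by
          unfold pvF; exact if_pos ⟨rfl, hm⟩
        rw [hf]
        show pvMySplit ('\\' :: 'n' :: pvTF r) = _
        rw [pvMySplit_cons_ne '\\' (by decide), pvMySplit_cons_ne 'n' (by decide),
          pvPH_pvPH, ih]
        simp only [pvSpec]
        rw [if_pos trivial, if_neg hm]
        rfl
    · have hf : pvF (c, r.headD '\n') = [c] := by
        unfold pvF; exact if_neg (fun h => hc h.1)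
      rw [hf]
      show pvMySplit (c :: pvTF r) = _
      rw [pvMySplit_cons_ne c hc, ih]
      simp only [pvSpec]
      rw [if_neg hc]

-- A's loop, recursively: current last line + remaining fragments
def pvMerge : List Char → List (List Char) → List (List Char)
  | h, [] => [h]
  | h, f :: fs => if pvAOK f then h :: pvMerge f fs else pvMerge (h ++ ('\\' :: 'n' :: f)) fs

lemma pvMerge_append (t : List (List Char)) : ∀ a h : List Char,
    pvMerge (a ++ h) t = pvPH a (pvMerge h t) := by
  induction t with
  | nil => intro a h; simp [pvMerge, pvPH]
  | cons f fs ih =>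
    intro a h
    simp only [pvMerge]
    by_cases hf : pvAOK f
    · simp [hf, pvPH]
    · simp only [hf, Bool.false_eq_true, ite_false]
      rw [List.append_assoc]
      exact ih a _

lemma pvFoldl_merge (frags : List (List Char)) : ∀ (init : List (List Char)) (h : List Char),
    frags.foldl pvStep (init ++ [h]) = init ++ pvMerge h frags := by
  induction frags with
  | nil => intro init h; simp [pvMerge]
  | cons f fs ih =>
    intro init h
    simp only [List.foldl_cons, pvStep]
    by_cases hf : pvAOK f
    · simp only [hf, ite_true]
      rw [ih (init ++ [h]) f]
      simp [pvMerge, hf]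
    · simp only [hf, Bool.false_eq_true, ite_false, List.dropLast_concat,
        List.getLastD_concat]
      rw [ih init (h ++ ('\\' :: 'n' :: f))]
      simp [pvMerge, hf]

lemma pvAOK_head (r : List Char) :
    pvAOK ((pvMySplit r).headD []) = decide (r.headD '\n' ∈ ['{', '}', '~', '>']) := by
  cases r with
  | nil => decide
  | cons d r' =>
    by_cases hd : d = '\n'
    · subst hd; rw [pvMySplit_nl]; simp only [List.headD_cons]; rfl
    · rw [pvMySplit_cons_ne d hd]
      cases h : pvMySplit r' with
      | nil => exact absurd h (pvMySplit_ne_nil r')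
      | cons a t => simp [pvPH, pvAOK]

lemma pvY (cs : List Char) :
    pvMerge ((pvMySplit cs).headD []) ((pvMySplit cs).drop 1) = pvSpec cs := by
  induction cs with
  | nil => rfl
  | cons c r ih =>
    by_cases hc : c = '\n'
    · subst hc
      rw [pvMySplit_nl]
      cases h : pvMySplit r with
      | nil => exact absurd h (pvMySplit_ne_nil r)
      | cons a t =>
        rw [h] at ih
        simp only [List.headD_cons, List.drop_succ_cons, List.drop_zero] at ih ⊢
        show pvMerge [] (a :: t) = _
        have hok : pvAOK a = decide (r.headD '\n' ∈ ['{', '}', '~', '>']) := by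
          have := pvAOK_head r; rwa [h] at this
        simp only [pvMerge]
        by_cases hm : r.headD '\n' ∈ ['{', '}', '~', '>']
        · rw [if_pos (by rw [hok]; exact decide_eq_true hm)]
          rw [ih]
          simp only [pvSpec]
          rw [if_pos trivial, if_pos hm]
        · rw [if_neg (by rw [hok]; exact fun hh => hm (of_decide_eq_true hh))]
          show pvMerge (['\\', 'n'] ++ a) t = _
          rw [pvMerge_append, ih]
          simp only [pvSpec]
          rw [if_pos trivial, if_neg hm]
    · rw [pvMySplit_cons_ne c hc]
      cases h : pvMySplit r with
      | nil => exact absurd h (pvMySplit_ne_nil r)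
      | cons a t =>
        rw [h] at ih
        simp only [List.headD_cons, List.drop_succ_cons, List.drop_zero] at ih ⊢
        show pvMerge ([c] ++ a) t = _
        rw [pvMerge_append, ih]
        simp only [pvSpec]
        rw [if_neg hc]

-- ===== VERDICT (by name: the statement is the Claim_ definition above) =====
theorem split_explanation_py_spec : Claim_equal_split_explanation_py := by
  intro explanation _
  unfold Spec_split_explanation_py split_explanation_py split_explanation_py_alt
  simp only []
  generalize (explanation.getD "").toList = cs
  rw [pvJoin_nil_flatten]
  rw [show ((cs.zip (cs.drop 1 ++ ['\n'])).map pvF).flatten = pvTF cs from rfl]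
  rw [pvSplitOn_nl (pvTF cs), pvX, pvSplitOn_nl cs]
  have hA := pvFoldl_merge ((pvMySplit cs).drop 1) [] ((pvMySplit cs).headD [])
  simp only [List.nil_append] at hA
  rw [hA, pvY]
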